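-- pv_equiv track=rewrite | github.com/nTele-Dev/tldreadme | tldreadme/coding_tools.py | _first_matching_line
-- ===== SOURCE A (Python) =====
-- def _query_terms(query: str) -> list[str]:
--     """Return normalized query terms for fuzzy text matching."""
--
--     return [term for term in query.lower().split() if term]
--
-- def _first_matching_line(text: str, query: str) -> tuple[int | None, str]:
--     """Return the first matching line and compact snippet for a query."""
--
--     lower_query = query.lower()
--     for index, line in enumerate(text.splitlines(), 1):
--         if lower_query in line.lower():
--             return index, _clip_text(line, max_lines=1, max_chars=220)
--
--     terms = _query_terms(query)
--     for index, line in enumerate(text.splitlines(), 1):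
--         if any(term in line.lower() for term in terms):
--             return index, _clip_text(line, max_lines=1, max_chars=220)
--     return None, _clip_text(text, max_lines=3, max_chars=220)
--
-- def _clip_text(text: str, max_lines: int = 10, max_chars: int = 500) -> str:
--     """Return a compact text excerpt."""
--
--     excerpt = "\n".join(text.splitlines()[:max_lines]).strip()
--     if len(excerpt) > max_chars:
--         return excerpt[: max_chars - 3].rstrip() + "..."
--     return excerpt
-- ===== SOURCE B (Python) =====
-- def _query_terms(query: str) -> list[str]:
--     return [term for term in query.lower().split() if term]
--
--
-- def _clip_text(text: str, max_lines: int = 10, max_chars: int = 500) -> str: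
--     excerpt = "\n".join(text.splitlines()[:max_lines]).strip()
--     if len(excerpt) > max_chars:
--         return excerpt[: max_chars - 3].rstrip() + "..."
--     return excerpt
--
--
-- def _first_matching_line(text: str, query: str) -> tuple:
--     """Single pass: return immediately on a substring match; remember the
--     first term match as a pending fallback used only after the full scan."""
--     lower_query = query.lower()
--     terms = _query_terms(query)
--     pending = None
--     for index, line in enumerate(text.splitlines(), 1):
--         line_lower = line.lower()
--         if lower_query in line_lower:
--             return index, _clip_text(line, max_lines=1, max_chars=220)
--         if pending is None and any(term in line_lower for term in terms):
--             pending = (index, _clip_text(line, max_lines=1, max_chars=220))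
--     if pending is not None:
--         return pending
--     return None, _clip_text(text, max_lines=3, max_chars=220)
-- ===== Notes on version B (the rewrite author's own statement) =====
-- stated objective: alternative
-- what changed: Replaces A's two priority passes over text.splitlines() by a single pass that returns immediately on a substring match and remembers the first term match as a pending fallback used only after the full scan.
import Mathlib
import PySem

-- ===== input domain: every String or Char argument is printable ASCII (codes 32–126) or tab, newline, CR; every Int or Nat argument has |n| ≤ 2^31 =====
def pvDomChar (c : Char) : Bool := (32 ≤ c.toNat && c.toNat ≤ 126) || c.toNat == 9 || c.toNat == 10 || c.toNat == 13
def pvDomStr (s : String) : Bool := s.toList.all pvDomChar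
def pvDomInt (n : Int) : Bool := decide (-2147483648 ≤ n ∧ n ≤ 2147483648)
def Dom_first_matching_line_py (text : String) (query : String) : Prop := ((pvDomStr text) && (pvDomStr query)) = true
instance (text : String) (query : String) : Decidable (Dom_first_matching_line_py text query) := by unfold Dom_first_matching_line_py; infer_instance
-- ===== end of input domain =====

-- B merges A's two priority passes into one scan with a remembered term-match fallback; objective: alternative decomposition, same cost.

-- shared module helpers (_clip_text and _query_terms, used verbatim by both Pythons)
def pvClip (text : String) (maxLines : Int) (maxChars : Int) : String :=
  let excerpt := PySem.Str.strip (PySem.Str.join "\n" (PySem.List.slice (PySem.Str.splitlines text) none (some maxLines)))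
  if ((PySem.Str.len excerpt : Int) > maxChars) then
    PySem.Str.rstrip (PySem.Str.slice excerpt none (some (maxChars - 3))) ++ "..."
  else excerpt

def pvQueryTerms (query : String) : List String :=
  (PySem.Str.split₀ (PySem.Str.lower query)).filter (fun t => !(t == ""))

-- ===== PORT A =====
-- first pass: substring match
def pvALoop1 : List String → Int → String → Option (Int × String)
  | [], _, _ => none
  | l :: rest, i, q =>
      if PySem.Str.isIn q (PySem.Str.lower l) then some (i, pvClip l 1 220)
      else pvALoop1 rest (i + 1) q

-- second pass: any-term match
def pvALoop2 : List String → Int → List String → Option (Int × String)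
  | [], _, _ => none
  | l :: rest, i, terms =>
      if terms.any (fun t => PySem.Str.isIn t (PySem.Str.lower l)) then some (i, pvClip l 1 220)
      else pvALoop2 rest (i + 1) terms

def first_matching_line_py (text : String) (query : String) : Option Int × String :=
  let lowerQuery := PySem.Str.lower query
  match pvALoop1 (PySem.Str.splitlines text) 1 lowerQuery with
  | some (i, s) => (some i, s)
  | none =>
      let terms := pvQueryTerms query
      match pvALoop2 (PySem.Str.splitlines text) 1 terms with
      | some (i, s) => (some i, s)
      | none => (none, pvClip text 3 220)

-- ===== PORT B =====
-- single pass: return on substring match, remember first term match as pending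
def pvBLoop : List String → Int → String → List String → Option (Int × String) → Option (Int × String)
  | [], _, _, _, pending => pending
  | l :: rest, i, q, terms, pending =>
      let ll := PySem.Str.lower l
      if PySem.Str.isIn q ll then some (i, pvClip l 1 220)
      else if pending.isNone && terms.any (fun t => PySem.Str.isIn t ll) then
        pvBLoop rest (i + 1) q terms (some (i, pvClip l 1 220))
      else pvBLoop rest (i + 1) q terms pending

def first_matching_line_py_alt (text : String) (query : String) : Option Int × String :=
  let lowerQuery := PySem.Str.lower query
  let terms := pvQueryTerms query
  match pvBLoop (PySem.Str.splitlines text) 1 lowerQuery terms none with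
  | some (i, s) => (some i, s)
  | none => (none, pvClip text 3 220)

-- ===== PRECONDITION & SPEC =====
def Spec_first_matching_line_py (text : String) (query : String) (out : Option Int × String) : Prop := out = first_matching_line_py_alt text query
instance (text : String) (query : String) (out : Option Int × String) : Decidable (Spec_first_matching_line_py text query out) := by unfold Spec_first_matching_line_py; infer_instance

-- ===== CLAIM (what is proved, stated in full; the proofs are below) =====
def Claim_equal_first_matching_line_py : Prop := ∀ (text : String) (query : String), Dom_first_matching_line_py text query → Spec_first_matching_line_py text query (first_matching_line_py text query)

-- ===== LEMMAS AND PROOFS =====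
-- the one-pass loop equals: first-pass result, else the pending candidate, else the second-pass result
theorem pvBLoop_eq (q : String) (terms : List String) :
    ∀ (lines : List String) (i : Int) (pending : Option (Int × String)),
    pvBLoop lines i q terms pending =
      (match pvALoop1 lines i q with
       | some r => some r
       | none =>
         match pending with
         | some p => some p
         | none => pvALoop2 lines i terms) := by
  intro lines
  induction lines with
  | nil => intro i pending; cases pending <;> rfl
  | cons l rest ih =>
      intro i pending
      simp only [pvBLoop, pvALoop1, pvALoop2]
      by_cases hq : PySem.Str.isIn q (PySem.Str.lower l) = true
      · simp only [if_pos hq]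
      · simp only [if_neg hq]
        cases pending with
        | some p =>
            simp only [Option.isNone_some, Bool.false_and, Bool.false_eq_true, if_false, ih]
        | none =>
            by_cases ht : (terms.any (fun t => PySem.Str.isIn t (PySem.Str.lower l))) = true
            · simp only [Option.isNone_none, Bool.true_and, if_pos ht, ih]
            · simp only [Option.isNone_none, Bool.true_and, if_neg ht, ih]

-- ===== VERDICT (by name: the statement is the Claim_ definition above) =====
theorem first_matching_line_py_spec : Claim_equal_first_matching_line_py := by
  intro text query _
  unfold Spec_first_matching_line_py first_matching_line_py first_matching_line_py_alt
  simp only [pvBLoop_eq]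
  cases h1 : pvALoop1 (PySem.Str.splitlines text) 1 (PySem.Str.lower query) with
  | some p => rfl
  | none =>
      cases h2 : pvALoop2 (PySem.Str.splitlines text) 1 (pvQueryTerms query) with
      | some p => rfl
      | none => rfl
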